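-- pv_equiv track=rewrite | github.com/W1nOfGood/01276121-COMPUTER-PROGRAMMING | Chapter 8 Functions/item2.py | sort_avoid_negative_num
-- ===== SOURCE A (Python) =====
-- def sort_avoid_negative_num(nums):
--     positive = []
--     negative = []
--     finalre = []
--     pos = 0
--     poslist = 0
--     for i in range(len(nums)):
--         if nums[i] >= 0:
--             positive.append(nums[i])
--         else:
--             negative.append(nums[i])
--         positive.sort()
--
--     for numarr in nums:
--         if numarr < 0:
--             finalre.append(negative[poslist])
--             poslist += 1
--         else:
--             finalre.append(positive[pos])
--             pos += 1
--     return finalre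
-- ===== SOURCE B (Python) =====
-- def sort_avoid_negative_num(nums):
--     # Selection by repeated minimum extraction: keep a pool of the
--     # non-negatives; each non-negative slot gets min(pool), which is then
--     # removed from the pool. Negatives pass through in place. No sort call.
--     pool = [x for x in nums if x >= 0]
--     out = []
--     for x in nums:
--         if x < 0:
--             out.append(x)
--         else:
--             m = min(pool)
--             pool.remove(m)
--             out.append(m)
--     return out
-- ===== Notes on version B (the rewrite author's own statement) =====
-- stated objective: alternative
-- what changed: A re-sorts the growing positives list after every element and then replays nums with two cursor indices into the prebuilt lists; B never sorts at all: it keeps a pool of the non-negatives and fills each non-negative slot by extracting min(pool) (selection sort interleaved with the scan), negatives passing through in place.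
import Mathlib
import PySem

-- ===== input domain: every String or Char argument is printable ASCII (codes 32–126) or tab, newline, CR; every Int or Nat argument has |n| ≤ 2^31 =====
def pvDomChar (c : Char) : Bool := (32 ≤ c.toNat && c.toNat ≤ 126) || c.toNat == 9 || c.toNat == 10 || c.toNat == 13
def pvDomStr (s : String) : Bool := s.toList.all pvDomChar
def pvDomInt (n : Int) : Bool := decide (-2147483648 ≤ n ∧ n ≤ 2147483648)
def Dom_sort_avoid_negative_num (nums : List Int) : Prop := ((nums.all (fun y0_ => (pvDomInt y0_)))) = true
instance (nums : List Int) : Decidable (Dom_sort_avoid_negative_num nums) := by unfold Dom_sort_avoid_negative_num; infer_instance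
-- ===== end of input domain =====

-- B never sorts: it fills each non-negative slot by extracting min() from a pool of the
-- non-negatives (selection), negatives in place; objective: alternative algorithm.


-- ===== PORT A =====
-- first loop: builds (positive, negative), re-sorting `positive` after every element
def pvStepA (s : List Int × List Int) (x : Int) : List Int × List Int :=
  if 0 ≤ x then (PySem.List.sorted (s.1 ++ [x]) (fun y => y) false, s.2)
  else (PySem.List.sorted s.1 (fun y => y) false, s.2 ++ [x])

-- second loop: replays nums, consuming positive/negative via the cursors pos/poslist
-- (the indices are always in range, so pyGetD's default 0 is never used)
def pvStepB (positive negative : List Int) (t : List Int × Int × Int) (x : Int) :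
    List Int × Int × Int :=
  if x < 0 then (t.1 ++ [PySem.List.pyGetD negative t.2.2 0], t.2.1, t.2.2 + 1)
  else (t.1 ++ [PySem.List.pyGetD positive t.2.1 0], t.2.1 + 1, t.2.2)

def sort_avoid_negative_num (nums : List Int) : List Int :=
  let st := (PySem.List.pyRange 0 (PySem.List.len nums)).foldl
      (fun s i => pvStepA s (PySem.List.pyGetD nums i 0)) ([], [])
  let fin := nums.foldl (pvStepB st.1 st.2) ([], 0, 0)
  fin.1

-- ===== PORT B =====
-- the loop of Source B: negatives pass through, a non-negative slot takes min(pool)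
-- which is then removed; min/remove never fail in Source B (the pool holds exactly the
-- pending non-negatives), so the `none` branches are unreachable
def pvSel : List Int → List Int → List Int
  | [], _ => []
  | x :: xs, pool =>
    if x < 0 then x :: pvSel xs pool
    else match PySem.List.min? pool (fun y => y) with
      | none => []
      | some m => match PySem.List.remove? pool m with
        | none => []
        | some rest => m :: pvSel xs rest

def sort_avoid_negative_num_alt (nums : List Int) : List Int :=
  pvSel nums (nums.filter (fun x => decide (0 ≤ x)))

-- ===== PRECONDITION & SPEC =====
def Spec_sort_avoid_negative_num (nums : List Int) (out : List Int) : Prop := out = sort_avoid_negative_num_alt nums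
instance (nums : List Int) (out : List Int) : Decidable (Spec_sort_avoid_negative_num nums out) := by unfold Spec_sort_avoid_negative_num; infer_instance

-- ===== CLAIM (what is proved, stated in full; the proofs are below) =====
def Claim_equal_sort_avoid_negative_num : Prop := ∀ (nums : List Int), Dom_sort_avoid_negative_num nums → Spec_sort_avoid_negative_num nums (sort_avoid_negative_num nums)

-- ===== LEMMAS AND PROOFS =====

-- proof-only bridge: fill the non-negative slots from an explicit list
def pvFill : List Int → List Int → List Int
  | [], _ => []
  | x :: xs, ps =>
    if x < 0 then x :: pvFill xs ps
    else match ps with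
      | [] => []
      | p :: rest => p :: pvFill xs rest

-- A's first loop = sort once at the end of the partition
theorem pvLoop1 (l : List Int) (Q N : List Int) :
    l.foldl pvStepA (PySem.List.sorted Q (fun y => y) false, N)
      = (PySem.List.sorted (Q ++ l.filter (fun x => decide (0 ≤ x))) (fun y => y) false,
         N ++ l.filter (fun x => decide (x < 0))) := by
  induction l generalizing Q N with
  | nil => simp
  | cons x t ih =>
    by_cases hx : 0 ≤ x
    · have hs : PySem.List.sorted (PySem.List.sorted Q (fun y => y) false ++ [x]) (fun y => y) false
          = PySem.List.sorted (Q ++ [x]) (fun y => y) false := by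
        exact PySem.List.sorted_eq_sorted_of_perm _ _ _ (fun a b h => h)
          ((PySem.List.sorted_perm Q (fun y => y) false).append_right [x])
      simp only [List.foldl_cons, pvStepA, if_pos hx, hs, ih (Q ++ [x]) N]
      simp [hx, not_lt.mpr hx]
    · simp only [List.foldl_cons, pvStepA, if_neg hx, PySem.List.sorted_sorted,
        ih Q (N ++ [x])]
      simp [hx, not_le.mp hx]

-- A's second loop = pvFill on the remaining sorted positives, as long as
-- the negative cursor points at the pending negatives and positives suffice
theorem pvLoop2 (l : List Int) (P N acc : List Int) (p q : Nat)
    (hq : N.drop q = l.filter (fun x => decide (x < 0)))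
    (hp : p + l.countP (fun x => decide (0 ≤ x)) ≤ P.length) :
    (l.foldl (pvStepB P N) (acc, (p : Int), (q : Int))).1 = acc ++ pvFill l (P.drop p) := by
  induction l generalizing acc p q with
  | nil => simp [pvFill]
  | cons x t ih =>
    by_cases hx : x < 0
    · have hdq : N.drop q = x :: t.filter (fun x => decide (x < 0)) := by
        simpa [List.filter_cons, hx] using hq
      have hqlt : q < N.length := by
        by_contra h
        rw [List.drop_eq_nil_of_le (by omega)] at hdq; simp at hdq
      rw [List.drop_eq_getElem_cons hqlt] at hdq
      simp only [List.cons.injEq] at hdq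
      have hNq : N.getD q 0 = x := by
        simp [List.getD_eq_getElem?_getD, List.getElem?_eq_getElem hqlt, hdq.1]
      have hdq1 : N.drop (q + 1) = t.filter (fun x => decide (x < 0)) := hdq.2
      have hcast : ((q : Int) + 1) = ((q + 1 : Nat) : Int) := by push_cast; ring
      simp only [List.foldl_cons, pvStepB, if_pos hx, PySem.List.pyGetD_natCast, hNq, hcast]
      rw [ih (acc ++ [x]) p (q + 1) hdq1 (by simpa [List.countP_cons, not_le.mpr hx] using hp)]
      simp [pvFill, hx]
    · have hplt : p < P.length := by
        have : t.countP (fun x => decide (0 ≤ x)) + 1 ≤ P.length - p := by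
          have := hp
          simp [not_lt.mp hx] at this
          omega
        omega
      have hPp : P.getD p 0 = P[p] := by
        simp [List.getD_eq_getElem?_getD, List.getElem?_eq_getElem hplt]
      have hdrop : P.drop p = P[p] :: P.drop (p + 1) := List.drop_eq_getElem_cons hplt
      have hcast : ((p : Int) + 1) = ((p + 1 : Nat) : Int) := by push_cast; ring
      simp only [List.foldl_cons, pvStepB, if_neg hx, PySem.List.pyGetD_natCast, hPp, hcast]
      rw [ih (acc ++ [P[p]]) (p + 1) q (by simpa [List.filter_cons, hx] using hq)
        (by simp [not_lt.mp hx] at hp; omega)]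
      have hfill : pvFill (x :: t) (P[p] :: P.drop (p + 1)) = P[p] :: pvFill t (P.drop (p + 1)) := by
        simp [pvFill, hx]
      rw [hdrop, hfill]
      simp

-- extracting the minimum of a nonempty pool peels the head of its sorted form
theorem pvMinHead (pool : List Int) (m : Int)
    (hm : PySem.List.min? pool (fun y => y) = some m) :
    PySem.List.sorted pool (fun y => y) false
      = m :: PySem.List.sorted (pool.erase m) (fun y => y) false := by
  have hmem : m ∈ pool := PySem.List.min?_mem hm
  have hmin : ∀ y ∈ pool, m ≤ y := PySem.List.min?_isMin hm
  obtain ⟨h, t, hst⟩ : ∃ h t, PySem.List.sorted pool (fun y => y) false = h :: t := by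
    rcases hs : PySem.List.sorted pool (fun y => y) false with _ | ⟨h, t⟩
    · rw [PySem.List.sorted_eq_nil_iff] at hs; subst hs; simp at hmem
    · exact ⟨h, t, rfl⟩
  have hperm : (h :: t).Perm pool := hst ▸ PySem.List.sorted_perm pool (fun y => y) false
  have hhm : h = m := by
    have h1 : h ≤ m := PySem.List.key_head_sorted_le pool (fun y => y) hst m hmem
    have h2 : m ≤ h := hmin h (hperm.mem_iff.mp (by simp))
    omega
  subst hhm
  rw [hst]
  congr 1
  have hpw : (h :: t).Pairwise (fun a b => a ≤ b) := by
    have := PySem.List.sorted_pairwise pool (fun y => y)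
    rw [hst] at this; exact this
  refine (PySem.List.sorted_id_eq_of_perm_of_pairwise _ t ?_ (List.Pairwise.of_cons hpw)).symm
  have := hperm.erase h
  simpa using this

-- B's loop = pvFill on the sorted pool, as long as the pool is large enough
theorem pvSel_eq_fill (l : List Int) (pool : List Int)
    (hp : l.countP (fun x => decide (0 ≤ x)) ≤ pool.length) :
    pvSel l pool = pvFill l (PySem.List.sorted pool (fun y => y) false) := by
  induction l generalizing pool with
  | nil => simp [pvSel, pvFill]
  | cons x t ih =>
    by_cases hx : x < 0
    · simp only [pvSel, pvFill, if_pos hx]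
      exact congrArg _ (ih pool (by simpa [List.countP_cons, not_le.mpr hx] using hp))
    · have hne : pool ≠ [] := by
        intro h; subst h
        simp [not_lt.mp hx] at hp
      obtain ⟨m, hm⟩ : ∃ m, PySem.List.min? pool (fun y => y) = some m := by
        rcases h : PySem.List.min? pool (fun y => y) with _ | m
        · exact absurd ((PySem.List.min?_eq_none_iff pool (fun y => y)).mp h) hne
        · exact ⟨m, rfl⟩
      have hmem : m ∈ pool := PySem.List.min?_mem hm
      have hrem : PySem.List.remove? pool m = some (pool.erase m) :=
        PySem.List.remove?_eq_some_erase pool m hmem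
      simp only [pvSel, if_neg hx, hm, hrem, pvMinHead pool m hm, pvFill]
      refine congrArg _ (ih (pool.erase m) ?_)
      have hlen : (pool.erase m).length + 1 = pool.length := by
        rw [List.length_erase_of_mem hmem]
        have := List.length_pos_of_mem hmem; omega
      have := hp
      simp [not_lt.mp hx] at this
      omega

-- ===== VERDICT (by name: the statement is the Claim_ definition above) =====
theorem sort_avoid_negative_num_spec : Claim_equal_sort_avoid_negative_num := by
  intro nums _
  unfold Spec_sort_avoid_negative_num sort_avoid_negative_num sort_avoid_negative_num_alt
  have h1 : (PySem.List.pyRange 0 (PySem.List.len nums)).foldl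
      (fun s i => pvStepA s (PySem.List.pyGetD nums i 0)) ([], [])
      = nums.foldl pvStepA ([], []) := by
    simpa using PySem.List.foldl_pyRange_pyGetD nums 0 pvStepA (([], []) : List Int × List Int)
      (a := 0) le_rfl
  have h2 : nums.foldl pvStepA ([], []) =
      (PySem.List.sorted (nums.filter (fun x => decide (0 ≤ x))) (fun y => y) false,
       nums.filter (fun x => decide (x < 0))) := by
    simpa using pvLoop1 nums [] []
  have h3 : (nums.foldl (pvStepB
        (PySem.List.sorted (nums.filter (fun x => decide (0 ≤ x))) (fun y => y) false)
        (nums.filter (fun x => decide (x < 0)))) ([], 0, 0)).1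
      = pvFill nums (PySem.List.sorted (nums.filter (fun x => decide (0 ≤ x))) (fun y => y) false) := by
    simpa using pvLoop2 nums
      (PySem.List.sorted (nums.filter (fun x => decide (0 ≤ x))) (fun y => y) false)
      (nums.filter (fun x => decide (x < 0))) [] 0 0 (by simp)
      (by simp [PySem.List.length_sorted, List.countP_eq_length_filter])
  rw [pvSel_eq_fill nums (nums.filter (fun x => decide (0 ≤ x)))
    (by simp [List.countP_eq_length_filter])]
  simp only [h1, h2, h3]
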